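-- pv_equiv track=rewrite | github.com/ebelo/qfit | mapbox_config.py | _landuse_fill_opacity_base_layer_id
-- ===== SOURCE A (Python) =====
-- _LANDUSE_LAYER_ID = "landuse"
--
-- _LANDUSE_FILL_OPACITY_VARIANTS: tuple[
--     tuple[str, object, float | None, float | None, bool],
--     ...,
-- ] = (
--     (
--         "residential-below-z8",
--         ["match", ["get", "class"], "residential", True, False],
--         None,
--         8.0,
--         True,
--     ),
--     (
--         "residential-z8-to-z10",
--         ["match", ["get", "class"], "residential", True, False],
--         8.0,
--         10.0,
--         True,
--     ),
--     (
--         "residential-z10-plus",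
--         ["match", ["get", "class"], "residential", True, False],
--         10.0,
--         None,
--         True,
--     ),
--     (
--         "other-below-z8",
--         ["match", ["get", "class"], "residential", False, True],
--         None,
--         8.0,
--         False,
--     ),
--     (
--         "other-z8-to-z10",
--         ["match", ["get", "class"], "residential", False, True],
--         8.0,
--         10.0,
--         False,
--     ),
--     (
--         "other-z10-plus",
--         ["match", ["get", "class"], "residential", False, True],
--         10.0,
--         None,
--         False,
--     ),
-- )
--
-- def _landuse_fill_opacity_base_layer_id(layer_id: object) -> str | None:
--     normalized = str(layer_id or "")
--     if normalized == _LANDUSE_LAYER_ID: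
--         return _LANDUSE_LAYER_ID
--     for suffix, _class_filter, _band_minzoom, _band_maxzoom, _fill_opacity in _LANDUSE_FILL_OPACITY_VARIANTS:
--         opacity_variant_id = f"{_LANDUSE_LAYER_ID}-{suffix}"
--         if normalized == opacity_variant_id or normalized.startswith(f"{opacity_variant_id}-"):
--             return _LANDUSE_LAYER_ID
--     return None
-- ===== SOURCE B (Python) =====
-- _LANDUSE_LAYER_ID = "landuse"
--
-- _SUFFIXES = (
--     "residential-below-z8",
--     "residential-z8-to-z10",
--     "residential-z10-plus",
--     "other-below-z8",
--     "other-z8-to-z10",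
--     "other-z10-plus",
-- )
--
-- # Precomputed id sets: the loop over variants disappears into hash lookups.
-- _VARIANT_IDS = frozenset(f"{_LANDUSE_LAYER_ID}-{s}" for s in _SUFFIXES)
-- _VALID_IDS = _VARIANT_IDS | {_LANDUSE_LAYER_ID}
--
--
-- def _landuse_fill_opacity_base_layer_id(layer_id: object) -> str | None:
--     normalized = str(layer_id or "")
--     if normalized in _VALID_IDS:
--         return _LANDUSE_LAYER_ID
--     # startswith("<variant>-") <=> some dash in the input closes a variant id prefix
--     if any(ch == "-" and normalized[:i] in _VARIANT_IDS
--            for i, ch in enumerate(normalized)):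
--         return _LANDUSE_LAYER_ID
--     return None
-- ===== Notes on version B (the rewrite author's own statement) =====
-- stated objective: alternative
-- what changed: B inverts the scan: instead of looping over the six variant ids testing equality/startswith on each, it precomputes frozensets of valid ids and checks the whole input, plus each dash-bounded prefix of the input, by set membership.
import Mathlib
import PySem

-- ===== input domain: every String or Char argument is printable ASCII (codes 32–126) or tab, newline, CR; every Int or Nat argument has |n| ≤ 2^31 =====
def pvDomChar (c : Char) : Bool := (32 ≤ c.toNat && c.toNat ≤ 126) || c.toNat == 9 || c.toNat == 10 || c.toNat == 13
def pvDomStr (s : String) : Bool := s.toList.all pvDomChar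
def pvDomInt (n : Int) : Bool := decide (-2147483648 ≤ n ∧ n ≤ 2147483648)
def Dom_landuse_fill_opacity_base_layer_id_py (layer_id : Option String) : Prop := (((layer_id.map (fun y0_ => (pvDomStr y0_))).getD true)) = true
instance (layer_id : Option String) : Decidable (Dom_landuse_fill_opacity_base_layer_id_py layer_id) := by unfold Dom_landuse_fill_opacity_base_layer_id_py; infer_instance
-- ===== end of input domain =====

-- B replaces A's loop over the six variant ids (equality/startswith test per variant) by
-- membership of the input, and of each dash-bounded prefix of the input, in precomputed id sets.

-- ===== PORT A =====
-- suffixes (shared module constant: the first components of _LANDUSE_FILL_OPACITY_VARIANTS, used by both ports) of _LANDUSE_FILL_OPACITY_VARIANTS (only the first tuple component is read by the loop)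
def pvSuffixesA : List String :=
  ["residential-below-z8", "residential-z8-to-z10", "residential-z10-plus",
   "other-below-z8", "other-z8-to-z10", "other-z10-plus"]

-- the for-loop of A: first matching variant returns "landuse"
def pvLoopA (normalized : String) : List String → Option String
  | [] => none
  | suffix :: rest =>
    let opacity_variant_id := "landuse" ++ "-" ++ suffix
    if normalized = opacity_variant_id ∨ PySem.Str.startswith normalized (opacity_variant_id ++ "-") = true
    then some "landuse"
    else pvLoopA normalized rest

def landuse_fill_opacity_base_layer_id_py (layer_id : Option String) : Option String :=
  -- str(layer_id or ""): None → "", a string stays itself ("" or "" is "")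
  let normalized := layer_id.getD ""
  if normalized = "landuse" then some "landuse"
  else pvLoopA normalized pvSuffixesA

-- ===== PORT B =====
-- _VARIANT_IDS = frozenset("landuse-" + s for s in suffixes)
def pvVariantIds : PySem.Set String :=
  PySem.Set.ofList (pvSuffixesA.map (fun s => "landuse" ++ "-" ++ s))

-- _VALID_IDS = _VARIANT_IDS | {"landuse"}
def pvValidIds : PySem.Set String :=
  PySem.Set.union pvVariantIds (PySem.Set.ofList ["landuse"])

def landuse_fill_opacity_base_layer_id_py_alt (layer_id : Option String) : Option String :=
  let normalized := layer_id.getD ""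
  if PySem.Set.contains pvValidIds normalized then some "landuse"
  else if (PySem.List.enumerate normalized.toList 0).any
      (fun p => p.2 == '-' && PySem.Set.contains pvVariantIds (PySem.Str.slice normalized none (some p.1)))
  then some "landuse"
  else none

-- ===== PRECONDITION & SPEC =====
def Spec_landuse_fill_opacity_base_layer_id_py (layer_id : Option String) (out : Option String) : Prop := out = landuse_fill_opacity_base_layer_id_py_alt layer_id
instance (layer_id : Option String) (out : Option String) : Decidable (Spec_landuse_fill_opacity_base_layer_id_py layer_id out) := by unfold Spec_landuse_fill_opacity_base_layer_id_py; infer_instance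

-- ===== CLAIM (what is proved, stated in full; the proofs are below) =====
def Claim_equal_landuse_fill_opacity_base_layer_id_py : Prop := ∀ (layer_id : Option String), Dom_landuse_fill_opacity_base_layer_id_py layer_id → Spec_landuse_fill_opacity_base_layer_id_py layer_id (landuse_fill_opacity_base_layer_id_py layer_id)

-- ===== LEMMAS AND PROOFS =====

-- a list ends a prefix v at a dash iff v++"-" is a prefix of it
theorem pv_prefix_dash_iff (v n : List Char) :
    ((v ++ ['-']) <+: n) ↔ ∃ k, ∃ _ : k < n.length, n[k] = '-' ∧ n.take k = v := by
  constructor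
  · intro h
    have hl : v.length < n.length := by have := h.length_le; simp at this; omega
    have ht := List.prefix_iff_eq_take.mp h
    refine ⟨v.length, hl, ?_⟩
    rw [show (v ++ ['-']).length = v.length + 1 by simp] at ht
    rw [List.take_add_one, List.getElem?_eq_getElem hl] at ht
    have hlen : v.length = (n.take v.length).length := by simp; omega
    obtain ⟨h1, h2⟩ := List.append_inj ht.symm hlen.symm
    simp at h2
    exact ⟨h2, h1⟩
  · rintro ⟨k, hk, hc, ht⟩
    have : v ++ ['-'] = n.take (k+1) := by
      rw [List.take_add_one, List.getElem?_eq_getElem hk, ht, hc]; rfl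
    rw [this]; exact List.take_prefix _ _

-- A's loop returns some "landuse" iff some listed suffix matches
theorem pv_loopA_eq (n : String) (l : List String) :
    pvLoopA n l =
      if (∃ s ∈ l, n = "landuse" ++ "-" ++ s ∨
            PySem.Str.startswith n (("landuse" ++ "-" ++ s) ++ "-") = true)
      then some "landuse" else none := by
  induction l with
  | nil => simp only [pvLoopA, List.not_mem_nil, false_and, exists_false, if_false]
    -- note: ∃ s ∈ [] is False
  | cons x xs ih =>
    simp only [pvLoopA, ih, List.exists_mem_cons_iff]
    by_cases h : n = "landuse" ++ "-" ++ x ∨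
        PySem.Str.startswith n (("landuse" ++ "-" ++ x) ++ "-") = true
    · rw [if_pos h, if_pos (Or.inl h)]
    · rw [if_neg h]
      by_cases h2 : ∃ s ∈ xs, n = "landuse" ++ "-" ++ s ∨
          PySem.Str.startswith n (("landuse" ++ "-" ++ s) ++ "-") = true
      · rw [if_pos h2, if_pos (Or.inr h2)]
      · rw [if_neg h2, if_neg (by rintro (hh | hh); exact h hh; exact h2 hh)]

-- membership in B's valid-id set
theorem pv_mem_valid (n : String) :
    PySem.Set.contains pvValidIds n = true ↔
      (n = "landuse" ∨ ∃ s ∈ pvSuffixesA, n = "landuse" ++ "-" ++ s) := by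
  rw [PySem.Set.contains_iff]
  unfold pvValidIds pvVariantIds
  rw [PySem.Set.mem_union, PySem.Set.mem_ofList, PySem.Set.mem_ofList, List.mem_map]
  constructor
  · rintro (⟨s, hs, hv⟩ | h)
    · exact Or.inr ⟨s, hs, hv.symm⟩
    · exact Or.inl (by simpa using h)
  · rintro (h | ⟨s, hs, hv⟩)
    · exact Or.inr (by simp [h])
    · exact Or.inl ⟨s, hs, hv.symm⟩

-- membership in B's variant-id set
theorem pv_mem_variant (m : String) :
    PySem.Set.contains pvVariantIds m = true ↔ ∃ s ∈ pvSuffixesA, m = "landuse" ++ "-" ++ s := by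
  rw [PySem.Set.contains_iff]
  unfold pvVariantIds
  rw [PySem.Set.mem_ofList, List.mem_map]
  constructor
  · rintro ⟨s, hs, hv⟩; exact ⟨s, hs, hv.symm⟩
  · rintro ⟨s, hs, hv⟩; exact ⟨s, hs, hv.symm⟩

-- B's dash-prefix scan finds exactly the startswith matches of A's loop
theorem pv_any_iff (n : String) :
    ((PySem.List.enumerate n.toList 0).any
      (fun p => p.2 == '-' && PySem.Set.contains pvVariantIds (PySem.Str.slice n none (some p.1))) = true)
    ↔ ∃ s ∈ pvSuffixesA,
        PySem.Str.startswith n (("landuse" ++ "-" ++ s) ++ "-") = true := by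
  rw [List.any_eq_true]
  constructor
  · rintro ⟨⟨i, ch⟩, hmem, hp⟩
    rcases (PySem.List.mem_enumerate_iff n.toList 0 ⟨i, ch⟩).mp hmem with ⟨k, hk, hpair⟩
    obtain ⟨hi, hch⟩ : i = (0:Int) + k ∧ ch = n.toList[k] := by
      exact ⟨congrArg Prod.fst hpair, congrArg Prod.snd hpair⟩
    simp only [Bool.and_eq_true, beq_iff_eq] at hp
    obtain ⟨hdash, hcont⟩ := hp
    rcases (pv_mem_variant _).mp hcont with ⟨s, hs, hv⟩
    refine ⟨s, hs, ?_⟩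
    rw [PySem.Str.startswith_eq, PySem.Chars.startswith_iff]
    have htl : (("landuse" ++ "-" ++ s) ++ "-").toList = ("landuse" ++ "-" ++ s).toList ++ ['-'] := by
      simp [String.toList_append]
    rw [htl, pv_prefix_dash_iff]
    refine ⟨k, hk, by rw [← hch, hdash], ?_⟩
    have hsl : (PySem.Str.slice n none (some i)).toList = n.toList.take k := by
      rw [hi]
      show (PySem.Str.slice n none (some ((0:Int) + (k:Nat)))).toList = _
      rw [PySem.Str.toList_slice, PySem.Chars.slice_eq_listSlice]
      rw [show ((0:Int) + (k:Nat)) = ((k:Nat):Int) by omega]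
      exact PySem.List.slice_to_natCast n.toList k
    rw [hv] at hsl
    exact hsl.symm
  · rintro ⟨s, hs, hsw⟩
    rw [PySem.Str.startswith_eq, PySem.Chars.startswith_iff] at hsw
    have htl : (("landuse" ++ "-" ++ s) ++ "-").toList = ("landuse" ++ "-" ++ s).toList ++ ['-'] := by
      simp [String.toList_append]
    rw [htl, pv_prefix_dash_iff] at hsw
    rcases hsw with ⟨k, hk, hdash, htake⟩
    refine ⟨((0:Int) + k, n.toList[k]), (PySem.List.mem_enumerate_iff n.toList 0 _).mpr ⟨k, hk, rfl⟩, ?_⟩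
    simp only [Bool.and_eq_true, beq_iff_eq]
    refine ⟨hdash, (pv_mem_variant _).mpr ⟨s, hs, ?_⟩⟩
    apply String.toList_inj.mp
    rw [PySem.Str.toList_slice, PySem.Chars.slice_eq_listSlice]
    rw [show ((0:Int) + (k:Nat)) = ((k:Nat):Int) by omega]
    rw [PySem.List.slice_to_natCast n.toList k, htake]

-- the two if-chains agree for every normalized string
theorem pv_main (n : String) :
    (if n = "landuse" then some "landuse" else pvLoopA n pvSuffixesA) =
    (if PySem.Set.contains pvValidIds n then some "landuse"
     else if (PySem.List.enumerate n.toList 0).any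
         (fun p => p.2 == '-' && PySem.Set.contains pvVariantIds (PySem.Str.slice n none (some p.1)))
     then some "landuse" else none) := by
  rw [pv_loopA_eq]
  by_cases h1 : n = "landuse"
  · have hv : PySem.Set.contains pvValidIds n = true := (pv_mem_valid n).mpr (Or.inl h1)
    rw [if_pos h1, hv, if_pos rfl]
  · rw [if_neg h1]
    by_cases h2 : ∃ s ∈ pvSuffixesA, n = "landuse" ++ "-" ++ s
    · have hv : PySem.Set.contains pvValidIds n = true :=
        (pv_mem_valid n).mpr (Or.inr h2)
      have hcond : ∃ s ∈ pvSuffixesA, n = "landuse" ++ "-" ++ s ∨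
          PySem.Str.startswith n (("landuse" ++ "-" ++ s) ++ "-") = true := by
        rcases h2 with ⟨s, hs, he⟩; exact ⟨s, hs, Or.inl he⟩
      rw [if_pos hcond, hv, if_pos rfl]
    · by_cases h3 : ∃ s ∈ pvSuffixesA, PySem.Str.startswith n (("landuse" ++ "-" ++ s) ++ "-") = true
      · have hany := (pv_any_iff n).mpr h3
        have hcond : ∃ s ∈ pvSuffixesA, n = "landuse" ++ "-" ++ s ∨
            PySem.Str.startswith n (("landuse" ++ "-" ++ s) ++ "-") = true := by
          rcases h3 with ⟨s, hs, hsw⟩; exact ⟨s, hs, Or.inr hsw⟩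
        rw [if_pos hcond, hany]
        by_cases hv : PySem.Set.contains pvValidIds n = true
        · rw [hv, if_pos rfl]
        · rw [Bool.eq_false_iff.mpr hv, if_neg (by simp), if_pos rfl]
      · have hvalid : PySem.Set.contains pvValidIds n = false := by
          rw [Bool.eq_false_iff]
          intro hc
          rcases (pv_mem_valid n).mp hc with h | h
          · exact h1 h
          · exact h2 h
        have hany : ((PySem.List.enumerate n.toList 0).any
            (fun p => p.2 == '-' && PySem.Set.contains pvVariantIds (PySem.Str.slice n none (some p.1)))) = false := by
          rw [Bool.eq_false_iff]
          intro hc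
          exact h3 ((pv_any_iff n).mp hc)
        have hcond : ¬ ∃ s ∈ pvSuffixesA, n = "landuse" ++ "-" ++ s ∨
            PySem.Str.startswith n (("landuse" ++ "-" ++ s) ++ "-") = true := by
          rintro ⟨s, hs, h | h⟩
          · exact h2 ⟨s, hs, h⟩
          · exact h3 ⟨s, hs, h⟩
        rw [if_neg hcond, hvalid, if_neg (by simp), hany, if_neg (by simp)]

-- ===== VERDICT (by name: the statement is the Claim_ definition above) =====
theorem landuse_fill_opacity_base_layer_id_py_spec : Claim_equal_landuse_fill_opacity_base_layer_id_py := by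
  intro layer_id _
  exact pv_main (layer_id.getD "")
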